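-- pv_equiv track=rewrite | github.com/AJK-dev/kissim | kinsim_structure/encoding.py | from_residue
-- ===== SOURCE A (Python) =====
-- FEATURE_LOOKUP = {
--     'size': {
--         1: 'ALA CYS GLY PRO SER THR VAL'.split(),
--         2: 'ASN ASP GLN GLU HIS ILE LEU LYS MET'.split(),
--         3: 'ARG PHE TRP TYR'.split()
--     },
--     'hbd': {
--         0: 'ALA ASP GLU GLY ILE LEU MET PHE PRO VAL'.split(),
--         1: 'ASN CYS GLN HIS LYS SER THR TRP TYR'.split(),
--         3: 'ARG'.split()
--     },
--     'hba': {
--         0: 'ALA ARG CYS GLY ILE LEU LYS MET PHE PRO TRP VAL'.split(),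
--         1: 'ASN GLN HIS SER THR TYR'.split(),
--         2: 'ASP GLU'.split()
--     },
--     'charge': {
--         0: 'ALA ASN CYS GLN GLY HIS ILE LEU MET PHE PRO SER TRP TYR VAL'.split(),
--         1: 'ARG LYS THR'.split(),
--         -1: 'ASP GLU'.split()
--     },
--     'aromatic': {
--         0: 'ALA ARG ASN ASP CYS GLN GLU GLY ILE LEU LYS MET PRO SER THR VAL'.split(),
--         1: 'HIS PHE TRP TYR'.split()
--     },
--     'aliphatic': {
--         0: 'ARG ASN ASP GLN GLU GLY HIS LYS PHE SER TRP TYR'.split(),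
--         1: 'ALA CYS ILE LEU MET PRO THR VAL'.split()
--     }
-- }
--
-- def from_residue(residue, feature_type):
--     """
--     Get feature value for residue's size and pharmacophoric features (i.e. number of hydrogen bond donor,
--     hydrogen bond acceptors, charge features, aromatic features or aliphatic features )
--     (according to SiteAlign feature encoding).
--
--     Parameters
--     ----------
--     residue : str
--         Three-letter code for residue.
--     feature_type : str
--         Feature type name.
--
--     Returns
--     -------
--     int
--         Residue's size value according to SiteAlign feature encoding.
--
--     References
--     ----------
--     [1]_ Schalon et al., "A simple and fuzzy method to align and compare druggable ligand‐binding sites",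
--     Proteins, 2008.
--     """
--
--     if feature_type not in FEATURE_LOOKUP.keys():
--         raise KeyError(f'Feature {feature_type} does not exist. '
--                        f'Please choose from: {", ".join(FEATURE_LOOKUP.keys())}')
--
--     # Manual addition of modified residue(s)
--     # PTR (o-phosphotyrosine): Use parent amino acid for lookup
--     # MSE (selenomethionine): Use parent amino acid for lookup
--     if residue == 'PTR':
--         residue = 'TYR'
--     if residue == 'MSE':
--         residue = 'MET'
--
--     # Start with a feature of None
--     result = None
--
--     # If residue name is listed in the feature lookup, assign respective feature
--     for feature, residues in FEATURE_LOOKUP[feature_type].items():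
--
--         if residue in residues:
--             result = feature
--
--     return result
-- ===== SOURCE B (Python) =====
-- # Transposed table: one row of all six SiteAlign feature values per residue,
-- # selected by the feature's column index (instead of scanning feature-major groups).
--
-- FEATURE_ORDER = ['size', 'hbd', 'hba', 'charge', 'aromatic', 'aliphatic']
--
-- # residue -> [size, hbd, hba, charge, aromatic, aliphatic]
-- RESIDUE_ROWS = {
--     'ALA': [1, 0, 0, 0, 0, 1],
--     'ARG': [3, 3, 0, 1, 0, 0],
--     'ASN': [2, 1, 1, 0, 0, 0],
--     'ASP': [2, 0, 2, -1, 0, 0],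
--     'CYS': [1, 1, 0, 0, 0, 1],
--     'GLN': [2, 1, 1, 0, 0, 0],
--     'GLU': [2, 0, 2, -1, 0, 0],
--     'GLY': [1, 0, 0, 0, 0, 0],
--     'HIS': [2, 1, 1, 0, 1, 0],
--     'ILE': [2, 0, 0, 0, 0, 1],
--     'LEU': [2, 0, 0, 0, 0, 1],
--     'LYS': [2, 1, 0, 1, 0, 0],
--     'MET': [2, 0, 0, 0, 0, 1],
--     'PHE': [3, 0, 0, 0, 1, 0],
--     'PRO': [1, 0, 0, 0, 0, 1],
--     'SER': [1, 1, 1, 0, 0, 0],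
--     'THR': [1, 1, 1, 1, 0, 1],
--     'TRP': [3, 1, 0, 0, 1, 0],
--     'TYR': [3, 1, 1, 0, 1, 0],
--     'VAL': [1, 0, 0, 0, 0, 1],
-- }
--
-- # Modified residues mapped to their parent amino acid
-- PARENT_RESIDUE = {'PTR': 'TYR', 'MSE': 'MET'}
--
--
-- def from_residue(residue, feature_type):
--     if feature_type not in FEATURE_ORDER:
--         raise KeyError(f'Feature {feature_type} does not exist. '
--                        f'Please choose from: {", ".join(FEATURE_ORDER)}')
--     idx = FEATURE_ORDER.index(feature_type)
--     row = RESIDUE_ROWS.get(PARENT_RESIDUE.get(residue, residue))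
--     return None if row is None else row[idx]
-- ===== Notes on version B (the rewrite author's own statement) =====
-- stated objective: alternative
-- what changed: Transposes the data: instead of A's feature-major scan over value-groups (membership test in each residue list, last match wins), B stores one row of all six feature values per residue and answers by fetching the residue's row and indexing it with the feature's column position (FEATURE_ORDER.index); the PTR/MSE remap becomes a dict .get.
import Mathlib
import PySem

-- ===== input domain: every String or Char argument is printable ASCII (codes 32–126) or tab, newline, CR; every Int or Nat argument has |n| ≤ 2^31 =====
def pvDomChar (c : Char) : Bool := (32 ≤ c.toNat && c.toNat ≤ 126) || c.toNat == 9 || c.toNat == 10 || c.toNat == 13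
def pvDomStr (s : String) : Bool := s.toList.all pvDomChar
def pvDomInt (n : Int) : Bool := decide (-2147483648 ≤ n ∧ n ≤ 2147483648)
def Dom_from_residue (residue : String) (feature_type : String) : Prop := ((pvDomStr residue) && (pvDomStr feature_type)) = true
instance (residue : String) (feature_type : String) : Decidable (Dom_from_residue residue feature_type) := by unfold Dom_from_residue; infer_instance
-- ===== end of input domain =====

-- B transposes A's feature-major group scan into a residue-major table: one row of the
-- six feature values per residue, selected by the feature's column index (alternative data layout).


-- ===== PORT A =====
-- first-match association-list lookup = Python dict lookup (keys here are unique)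
def alGet? {α : Type} (l : List (String × α)) (k : String) : Option α :=
  match l with
  | [] => none
  | (k', v) :: t => if k' = k then some v else alGet? t k

-- FEATURE_LOOKUP, dicts as association lists in insertion order
def featureLookup : List (String × List (Int × List String)) :=
  [ ("size",
      [ (1, ["ALA","CYS","GLY","PRO","SER","THR","VAL"]),
        (2, ["ASN","ASP","GLN","GLU","HIS","ILE","LEU","LYS","MET"]),
        (3, ["ARG","PHE","TRP","TYR"]) ]),
    ("hbd",
      [ (0, ["ALA","ASP","GLU","GLY","ILE","LEU","MET","PHE","PRO","VAL"]),
        (1, ["ASN","CYS","GLN","HIS","LYS","SER","THR","TRP","TYR"]),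
        (3, ["ARG"]) ]),
    ("hba",
      [ (0, ["ALA","ARG","CYS","GLY","ILE","LEU","LYS","MET","PHE","PRO","TRP","VAL"]),
        (1, ["ASN","GLN","HIS","SER","THR","TYR"]),
        (2, ["ASP","GLU"]) ]),
    ("charge",
      [ (0, ["ALA","ASN","CYS","GLN","GLY","HIS","ILE","LEU","MET","PHE","PRO","SER","TRP","TYR","VAL"]),
        (1, ["ARG","LYS","THR"]),
        (-1, ["ASP","GLU"]) ]),
    ("aromatic",
      [ (0, ["ALA","ARG","ASN","ASP","CYS","GLN","GLU","GLY","ILE","LEU","LYS","MET","PRO","SER","THR","VAL"]),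
        (1, ["HIS","PHE","TRP","TYR"]) ]),
    ("aliphatic",
      [ (0, ["ARG","ASN","ASP","GLN","GLU","GLY","HIS","LYS","PHE","SER","TRP","TYR"]),
        (1, ["ALA","CYS","ILE","LEU","MET","PRO","THR","VAL"]) ]) ]

-- literal port of A: KeyError → none (excluded by Pre_), then the scan over groups
def from_residue (residue : String) (feature_type : String) : Option Int :=
  match alGet? featureLookup feature_type with
  | none => none  -- Python raises KeyError here; these inputs are outside Pre_
  | some groups =>
    let residue1 := if residue = "PTR" then "TYR" else residue
    let residue2 := if residue1 = "MSE" then "MET" else residue1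
    groups.foldl (fun result g => if residue2 ∈ g.2 then some g.1 else result) none

-- ===== PORT B =====
-- FEATURE_ORDER
def featureOrder : List String := ["size", "hbd", "hba", "charge", "aromatic", "aliphatic"]

-- RESIDUE_ROWS: residue -> [size, hbd, hba, charge, aromatic, aliphatic]
def residueRows : List (String × List Int) :=
  [ ("ALA", [1, 0, 0, 0, 0, 1]),
    ("ARG", [3, 3, 0, 1, 0, 0]),
    ("ASN", [2, 1, 1, 0, 0, 0]),
    ("ASP", [2, 0, 2, -1, 0, 0]),
    ("CYS", [1, 1, 0, 0, 0, 1]),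
    ("GLN", [2, 1, 1, 0, 0, 0]),
    ("GLU", [2, 0, 2, -1, 0, 0]),
    ("GLY", [1, 0, 0, 0, 0, 0]),
    ("HIS", [2, 1, 1, 0, 1, 0]),
    ("ILE", [2, 0, 0, 0, 0, 1]),
    ("LEU", [2, 0, 0, 0, 0, 1]),
    ("LYS", [2, 1, 0, 1, 0, 0]),
    ("MET", [2, 0, 0, 0, 0, 1]),
    ("PHE", [3, 0, 0, 0, 1, 0]),
    ("PRO", [1, 0, 0, 0, 0, 1]),
    ("SER", [1, 1, 1, 0, 0, 0]),
    ("THR", [1, 1, 1, 1, 0, 1]),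
    ("TRP", [3, 1, 0, 0, 1, 0]),
    ("TYR", [3, 1, 1, 0, 1, 0]),
    ("VAL", [1, 0, 0, 0, 0, 1]) ]

-- PARENT_RESIDUE
def parentResidue : List (String × String) := [("PTR", "TYR"), ("MSE", "MET")]

-- literal port of B: KeyError → none (excluded by Pre_), column index + row lookup
def from_residue_alt (residue : String) (feature_type : String) : Option Int :=
  match PySem.List.index? featureOrder feature_type with
  | none => none  -- feature_type not in FEATURE_ORDER: Python raises KeyError; outside Pre_
  | some idx =>
    match alGet? residueRows ((alGet? parentResidue residue).getD residue) with
    | none => none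
    | some row => PySem.List.pyGet? row (idx : Int)  -- row[idx], idx always in range

-- ===== PRECONDITION & SPEC =====
-- Pre_ excludes exactly the feature types absent from FEATURE_LOOKUP, on which A raises KeyError.
def Pre_from_residue (residue : String) (feature_type : String) : Prop :=
  feature_type = "size" ∨ feature_type = "hbd" ∨ feature_type = "hba" ∨
  feature_type = "charge" ∨ feature_type = "aromatic" ∨ feature_type = "aliphatic"
instance (residue : String) (feature_type : String) : Decidable (Pre_from_residue residue feature_type) := by unfold Pre_from_residue; infer_instance

def pvWitness_from_residue : String × String := ("ALA", "size")

def Spec_from_residue (residue : String) (feature_type : String) (out : Option Int) : Prop := out = from_residue_alt residue feature_type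
instance (residue : String) (feature_type : String) (out : Option Int) : Decidable (Spec_from_residue residue feature_type out) := by unfold Spec_from_residue; infer_instance

-- ===== CLAIM (what is proved, stated in full; the proofs are below) =====
def Claim_equal_from_residue : Prop := ∀ (residue : String) (feature_type : String), Dom_from_residue residue feature_type → Pre_from_residue residue feature_type → Spec_from_residue residue feature_type (from_residue residue feature_type)

-- ===== LEMMAS AND PROOFS =====

-- the 20 standard residues (= keys of residueRows; every feature's groups partition them)
def allResidues : List String :=
  ["ALA","ARG","ASN","ASP","CYS","GLN","GLU","GLY","HIS","ILE",
   "LEU","LYS","MET","PHE","PRO","SER","THR","TRP","TYR","VAL"]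

-- lookup misses when the key is not among the stored keys
lemma alGet?_eq_none_of_not_mem {α : Type} (l : List (String × α)) (k : String)
    (h : k ∉ l.map Prod.fst) : alGet? l k = none := by
  induction l with
  | nil => rfl
  | cons p t ih =>
      simp only [List.map_cons, List.mem_cons, not_or] at h
      simp only [alGet?]
      rw [if_neg (fun hh => h.1 hh.symm)]
      exact ih h.2

-- if r is in no remaining group, the scan keeps its accumulator
lemma foldl_scan_const (r : String) (gs : List (Int × List String)) (a : Option Int)
    (h : ∀ g ∈ gs, r ∉ g.2) :
    gs.foldl (fun result g => if r ∈ g.2 then some g.1 else result) a = a := by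
  induction gs generalizing a with
  | nil => rfl
  | cons g t ih =>
      simp only [List.foldl_cons]
      rw [if_neg (h g (by simp))]
      exact ih _ (fun g' hg' => h g' (List.mem_cons_of_mem _ hg'))

-- residues outside the 20-residue table: A's scan keeps None
lemma nomem_scan (r : String) (gs : List (Int × List String))
    (hsub : gs.flatMap (fun g => g.2) ⊆ allResidues) (hm : r ∉ allResidues) :
    gs.foldl (fun result g => if r ∈ g.2 then some g.1 else result) none = none :=
  foldl_scan_const r gs none
    (fun g hg hx => hm (hsub (List.mem_flatMap.mpr ⟨g, hg, hx⟩)))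

-- … and B's row lookup misses too
lemma B_none (r ft : String) (hm : r ∉ allResidues) (h1 : r ≠ "PTR") (h2 : r ≠ "MSE") :
    from_residue_alt r ft = none := by
  have h1' : ¬ ("PTR" = r) := fun h => h1 h.symm
  have h2' : ¬ ("MSE" = r) := fun h => h2 h.symm
  have hrow : alGet? residueRows r = none := by
    apply alGet?_eq_none_of_not_mem
    have hk : residueRows.map Prod.fst = allResidues := by decide
    rw [hk]; exact hm
  simp only [from_residue_alt, parentResidue, alGet?]
  rw [if_neg h1', if_neg h2']
  cases PySem.List.index? featureOrder ft <;> simp [hrow]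

-- main case: residue is neither PTR nor MSE, so both remaps are the identity
lemma main_ne (r ft : String) (h1 : r ≠ "PTR") (h2 : r ≠ "MSE")
    (hft : Pre_from_residue r ft) : from_residue r ft = from_residue_alt r ft := by
  by_cases hm : r ∈ allResidues
  · rcases hft with h | h | h | h | h | h <;> subst h <;> fin_cases hm <;> decide
  · rw [B_none r ft hm h1 h2]
    rcases hft with h | h | h | h | h | h <;> subst h <;>
    · simp only [from_residue, featureLookup, alGet?, String.reduceEq, reduceIte]
      rw [if_neg h1, if_neg h2]
      exact nomem_scan r _ (by decide) hm

-- ===== VERDICT (by name: the statement is the Claim_ definition above) =====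
theorem from_residue_spec : Claim_equal_from_residue := by
  intro r ft _ hpre
  unfold Spec_from_residue
  by_cases h1 : r = "PTR"
  · subst h1; rcases hpre with h | h | h | h | h | h <;> subst h <;> decide
  · by_cases h2 : r = "MSE"
    · subst h2; rcases hpre with h | h | h | h | h | h <;> subst h <;> decide
    · exact main_ne r ft h1 h2 hpre
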